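-- pv_equiv track=rewrite | github.com/Swathidattha02/problem_solving | Problems.py | add_binary_ones_complement
-- ===== SOURCE A (Python) =====
-- def add_binary_ones_complement(a, b):
--     # Make both strings same length by adding leading 0s
--     if len(a) < len(b):
--         a = a.zfill(len(b))
--     else:
--         b = b.zfill(len(a))
--
--     result = ''
--     carry = 0
--     # Add bits from right to left
--     for i in range(len(a) - 1, -1, -1):
--         total = carry + int(a[i]) + int(b[i])
--         result = str(total % 2) + result
--         carry = total // 2
--
--     # Add carry if exists (1's complement rule)
--     if carry:
--         result = add_binary_ones_complement(result, '1')
--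
--     return result[-len(a):]  # Keep final length same
-- ===== SOURCE B (Python) =====
-- def add_binary_ones_complement(a, b):
--     # Closed-form: read both strings as base-2 weighted digit values, add them,
--     # apply the one's-complement end-around carry arithmetically, format back.
--     n = max(len(a), len(b))
--     if n == 0:
--         return ''
--     s = 0
--     for c in a:
--         s = s * 2 + int(c)
--     t = 0
--     for c in b:
--         t = t * 2 + int(c)
--     s += t
--     hi = 1 << n
--     if s >= hi:
--         m = s % hi
--         m = 1 if m == hi - 1 else m + 1
--     else:
--         m = s
--     return format(m, '0{}b'.format(n))
-- ===== Notes on version B (the rewrite author's own statement) =====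
-- stated objective: simpler
-- what changed: Replaces the right-to-left per-bit addition loop with recursive end-around-carry calls by a single numeric conversion, one closed-form end-around-carry adjustment, and one formatting step.
import Mathlib
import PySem

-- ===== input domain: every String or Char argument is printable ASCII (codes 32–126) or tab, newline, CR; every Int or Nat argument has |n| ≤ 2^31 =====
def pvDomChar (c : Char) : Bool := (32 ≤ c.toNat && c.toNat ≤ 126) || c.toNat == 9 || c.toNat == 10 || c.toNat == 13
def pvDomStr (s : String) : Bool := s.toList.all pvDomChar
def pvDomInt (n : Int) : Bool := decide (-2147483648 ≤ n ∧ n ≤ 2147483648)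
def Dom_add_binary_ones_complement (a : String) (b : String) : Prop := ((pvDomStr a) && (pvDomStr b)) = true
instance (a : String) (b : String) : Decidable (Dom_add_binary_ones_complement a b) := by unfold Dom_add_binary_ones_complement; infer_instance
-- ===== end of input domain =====

-- B replaces A's per-bit addition loop with recursive end-around-carry calls by one
-- numeric conversion, a closed-form end-around-carry adjustment and one formatting step (objective: simpler).


-- ===== PORT A =====
-- int(c) for a one-character string: exact for '0'..'9' (Pre_ admits only digit characters)
def pvDig (c : Char) : Nat := c.toNat - 48
-- s.zfill(w): left-pad with '0' to width w; exact for sign-less strings (Pre_ admits only digits)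
def pvZfillA (s : List Char) (w : Nat) : List Char := List.replicate (w - s.length) '0' ++ s
-- the 'for i in range(len(a)-1, -1, -1)' loop: pairs (a[i], b[i]) least-significant first,
-- state (result, carry); result built by prepending str(total % 2)
def addLoopA : List (Char × Char) → Nat → List Char → (List Char × Nat)
  | [], c, r => (r, c)
  | (x, y) :: rest, c, r =>
      let total := c + pvDig x + pvDig y
      addLoopA rest (total / 2) (Nat.digitChar (total % 2) :: r)
-- fuel bound for A's recursion: the numeric value of a digit string
def pvValA (l : List Char) : Nat := l.foldl (fun acc c => acc * 2 + pvDig c) 0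

-- A's body; the fuel argument only makes the recursion structural: each recursive call
-- strictly decreases pvValA a + pvValA b (proved in A_go_closed below), so with the fuel
-- supplied by add_binary_ones_complement the fuel-0 branch is never reached.
def addBinGo : Nat → String → String → String
  | 0, _, _ => ""
  | fuel + 1, a, b =>
      let a' := if a.length < b.length then pvZfillA a.toList b.length else a.toList
      let b' := if a.length < b.length then b.toList else pvZfillA b.toList a.length
      let p := addLoopA ((a'.zip b').reverse) 0 []
      let res := if p.2 ≠ 0 then (addBinGo fuel (String.ofList p.1) "1").toList else p.1
      String.ofList (PySem.List.slice res (some (-(a'.length : Int))) none)  -- result[-len(a):]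

def add_binary_ones_complement (a : String) (b : String) : String :=
  addBinGo (pvValA a.toList + pvValA b.toList + 1) a b

-- ===== PORT B =====
-- int(c) for a one-character string: exact for '0'..'9' (Pre_ admits only digit characters)
def pvDigB (c : Char) : Nat := c.toNat - 48
-- format(m, '0{n}b'): binary of m zero-padded to n digits; exact for m < 2^n (always the case in B)
def pvBinPadB : Nat → Nat → List Char
  | 0, _ => []
  | k + 1, m => pvBinPadB k (m / 2) ++ [Nat.digitChar (m % 2)]

def add_binary_ones_complement_alt (a : String) (b : String) : String :=
  let n := max a.length b.length
  if n = 0 then ""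
  else
    let s := a.toList.foldl (fun acc c => acc * 2 + pvDigB c) 0
    let t := b.toList.foldl (fun acc c => acc * 2 + pvDigB c) 0
    let s := s + t
    let hi := 2 ^ n
    let m := if s ≥ hi then (if s % hi = hi - 1 then 1 else s % hi + 1) else s
    String.ofList (pvBinPadB n m)

-- ===== PRECONDITION & SPEC =====
-- Pre_ admits exactly the inputs on which Python A returns: every character of both
-- strings a decimal digit (int(a[i]) raises ValueError on any other character).
def Pre_add_binary_ones_complement (a : String) (b : String) : Prop :=
  (a.toList.all Char.isDigit && b.toList.all Char.isDigit) = true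
instance (a : String) (b : String) : Decidable (Pre_add_binary_ones_complement a b) := by
  unfold Pre_add_binary_ones_complement; infer_instance
def pvWitness_add_binary_ones_complement : String × String := ("101", "11")

def Spec_add_binary_ones_complement (a : String) (b : String) (out : String) : Prop := out = add_binary_ones_complement_alt a b
instance (a : String) (b : String) (out : String) : Decidable (Spec_add_binary_ones_complement a b out) := by unfold Spec_add_binary_ones_complement; infer_instance

-- ===== CLAIM (what is proved, stated in full; the proofs are below) =====
def Claim_equal_add_binary_ones_complement : Prop := ∀ (a : String) (b : String), Dom_add_binary_ones_complement a b → Pre_add_binary_ones_complement a b → Spec_add_binary_ones_complement a b (add_binary_ones_complement a b)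

-- ===== LEMMAS AND PROOFS =====

def pvBits : Nat → Nat → List Char
  | 0, _ => []
  | k + 1, m => pvBits k (m / 2) ++ [Nat.digitChar (m % 2)]
def pairS : List (Char × Char) → Nat
  | [] => 0
  | (x, y) :: rest => pvDig x + pvDig y + 2 * pairS rest

lemma addLoopA_spec (ps : List (Char × Char)) (c : Nat) (r : List Char) :
    addLoopA ps c r =
      (pvBits ps.length ((c + pairS ps) % 2 ^ ps.length) ++ r, (c + pairS ps) / 2 ^ ps.length) := by
  induction ps generalizing c r with
  | nil => simp [addLoopA, pairS, pvBits]
  | cons p rest ih =>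
      obtain ⟨x, y⟩ := p
      rw [addLoopA, ih]
      have hM : c + pairS ((x, y) :: rest) = (c + pvDig x + pvDig y) + 2 * pairS rest := by
        simp [pairS]; ring
      set total := c + pvDig x + pvDig y with htot
      have h2L : (0:Nat) < 2 ^ rest.length := Nat.two_pow_pos _
      have hpow : (2:Nat) ^ (rest.length + 1) = 2 * 2 ^ rest.length := by rw [pow_succ]; ring
      have hdiv : (total + 2 * pairS rest) / 2 ^ (rest.length + 1)
          = (total / 2 + pairS rest) / 2 ^ rest.length := by
        rw [hpow, ← Nat.div_div_eq_div_mul]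
        congr 1; omega
      have hmod2 : (total + 2 * pairS rest) % 2 ^ (rest.length + 1) % 2 = total % 2 := by
        rw [hpow, Nat.mod_mod_of_dvd _ ⟨2 ^ rest.length, rfl⟩]; omega
      have hmoddiv : (total + 2 * pairS rest) % 2 ^ (rest.length + 1) / 2
          = (total / 2 + pairS rest) % 2 ^ rest.length := by
        rw [hpow, Nat.mod_mul_right_div_self]
        congr 1; omega
      simp only [List.length_cons, hM]
      rw [pvBits, hmoddiv, hmod2, hdiv]
      simp

lemma pvBits_length (k m : Nat) : (pvBits k m).length = k := by
  induction k generalizing m with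
  | zero => simp [pvBits]
  | succ k ih => simp [pvBits, ih]

lemma pvDig_digitChar (m : Nat) (h : m < 2) : pvDig (Nat.digitChar m) = m := by
  interval_cases m <;> decide

lemma pvValA_append_bit (l : List Char) (c : Char) :
    pvValA (l ++ [c]) = pvValA l * 2 + pvDig c := by
  simp [pvValA, List.foldl_append]

lemma pvValA_pvBits (k m : Nat) : pvValA (pvBits k m) = m % 2 ^ k := by
  induction k generalizing m with
  | zero => simp [pvBits, pvValA, Nat.mod_one]
  | succ k ih =>
      rw [pvBits, pvValA_append_bit, ih, pvDig_digitChar _ (Nat.mod_lt _ (by norm_num))]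
      have h2L : (0:Nat) < 2 ^ k := Nat.two_pow_pos _
      have hpow : (2:Nat) ^ (k + 1) = 2 ^ k * 2 := by rw [pow_succ]
      rw [hpow]
      have h1 : m / 2 % 2 ^ k = m % (2 ^ k * 2) / 2 := by
        rw [Nat.mul_comm, Nat.mod_mul_right_div_self]
      have h2 : m % 2 = m % (2 ^ k * 2) % 2 := by
        rw [Nat.mod_mod_of_dvd _ ⟨2 ^ k, by ring⟩]
      have h3 : m % (2 ^ k * 2) % 2 < 2 := Nat.mod_lt _ (by norm_num)
      omega

lemma pairS_append (l : List (Char × Char)) (x y : Char) :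
    pairS (l ++ [(x, y)]) = pairS l + (pvDig x + pvDig y) * 2 ^ l.length := by
  induction l with
  | nil => simp [pairS]
  | cons p rest ih =>
      obtain ⟨u, v⟩ := p
      simp [pairS, ih, pow_succ]; ring

lemma pvValA_cons (c : Char) (l : List Char) :
    pvValA (c :: l) = pvDig c * 2 ^ l.length + pvValA l := by
  show List.foldl _ (0 * 2 + pvDig c) l = _
  have key : ∀ (l : List Char) (acc : Nat),
      List.foldl (fun acc c => acc * 2 + pvDig c) acc l = acc * 2 ^ l.length + pvValA l := by
    intro l
    induction l with
    | nil => intro acc; simp [pvValA]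
    | cons d rest ih =>
        intro acc
        show List.foldl _ (acc * 2 + pvDig d) rest = _
        rw [ih (acc * 2 + pvDig d)]
        have : pvValA (d :: rest) = pvDig d * 2 ^ rest.length + pvValA rest := by
          show List.foldl _ (0 * 2 + pvDig d) rest = _
          rw [ih (0 * 2 + pvDig d)]; ring_nf
        rw [this]
        simp [pow_succ]; ring
  rw [key l (0 * 2 + pvDig c)]; ring_nf

lemma pairS_rev_zip : ∀ (u v : List Char), u.length = v.length →
    pairS ((u.zip v).reverse) = pvValA u + pvValA v := by
  intro u
  induction u with
  | nil => intro v h; simp [List.length_eq_zero_iff.mp h.symm, pairS, pvValA]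
  | cons x u' ih =>
      intro v h
      match v with
      | y :: v' =>
          have h' : u'.length = v'.length := by simpa using h
          simp only [List.zip_cons_cons, List.reverse_cons]
          rw [pairS_append, ih v' h']
          have hl : ((u'.zip v').reverse).length = u'.length := by
            simp [List.length_zip, h']
          rw [hl, pvValA_cons, pvValA_cons, ← h']
          ring

lemma pvValA_replicate_zero (k : Nat) (l : List Char) :
    pvValA (List.replicate k '0' ++ l) = pvValA l := by
  induction k with
  | zero => simp
  | succ k ih =>
      show pvValA ('0' :: (List.replicate k '0' ++ l)) = _
      rw [pvValA_cons, ih]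
      simp [pvDig]

lemma pvValA_zfill (l : List Char) (w : Nat) : pvValA (pvZfillA l w) = pvValA l :=
  pvValA_replicate_zero _ _

lemma pvZfillA_length (l : List Char) (w : Nat) : (pvZfillA l w).length = max l.length w := by
  simp [pvZfillA]; omega

def pvOut (n S : Nat) : Nat :=
  if S < 2 ^ n then S else if S % 2 ^ n = 2 ^ n - 1 then 1 else S % 2 ^ n + 1

lemma slice_from_neg_len {α : Type} (xs : List α) :
    PySem.List.slice xs (some (-(xs.length : Int))) none = xs := by
  rcases Nat.eq_zero_or_pos xs.length with h | h
  · simp [h, PySem.List.slice_none_none]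
  · rw [PySem.List.slice_from_neg_natCast _ _ h]; simp

lemma pvOut_wrap (n S : Nat) (hn1 : 1 ≤ n) (hge : 2 ^ n ≤ S) :
    pvOut n (S % 2 ^ n + 1) = pvOut n S := by
  have hpos : (0:Nat) < 2 ^ n := Nat.two_pow_pos _
  have h2n : (2:Nat) ≤ 2 ^ n := by
    calc (2:Nat) = 2 ^ 1 := by norm_num
    _ ≤ 2 ^ n := Nat.pow_le_pow_right (by norm_num) hn1
  have hmlt : S % 2 ^ n < 2 ^ n := Nat.mod_lt _ hpos
  unfold pvOut
  by_cases hm : S % 2 ^ n = 2 ^ n - 1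
  · have e1 : S % 2 ^ n + 1 = 2 ^ n := by omega
    rw [e1, Nat.mod_self, if_neg (lt_irrefl _), if_neg (show ¬ (0:Nat) = 2 ^ n - 1 by omega),
      if_neg (show ¬ S < 2 ^ n by omega), if_pos hm]
  · rw [if_pos (by omega), if_neg (show ¬ S < 2 ^ n by omega), if_neg hm]

set_option maxHeartbeats 1000000 in
lemma A_go_closed : ∀ (fuel : Nat) (a b : String), pvValA a.toList + pvValA b.toList < fuel →
    addBinGo fuel a b =
      String.ofList (pvBits (max a.length b.length)
        (pvOut (max a.length b.length) (pvValA a.toList + pvValA b.toList))) := by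
  intro fuel
  induction fuel with
  | zero => intro a b h; omega
  | succ fuel ih =>
    intro a b hfuel
    rw [addBinGo]
    set S := pvValA a.toList + pvValA b.toList with hSdef
    set a' := if a.length < b.length then pvZfillA a.toList b.length else a.toList with ha'
    set b' := if a.length < b.length then b.toList else pvZfillA b.toList a.length with hb'
    have hA : a.length = a.toList.length := by simp
    have hB : b.length = b.toList.length := by simp
    have hlen : a'.length = b'.length := by
      rw [ha', hb']
      by_cases hab : a.length < b.length
      · rw [if_pos hab, if_pos hab, pvZfillA_length]; omega
      · rw [if_neg hab, if_neg hab, pvZfillA_length]; omega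
    set n := max a.length b.length with hndef
    have hlenA : a'.length = n := by
      rw [ha', hndef]
      by_cases hab : a.length < b.length
      · rw [if_pos hab, pvZfillA_length]; omega
      · rw [if_neg hab]; omega
    have hval : pvValA a' + pvValA b' = S := by
      rw [ha', hb', hSdef]; split <;> simp [pvValA_zfill]
    have hzn : ((a'.zip b').reverse).length = n := by
      simp [List.length_zip, ← hlen, hlenA]
    rw [addLoopA_spec]
    simp only [hzn, Nat.zero_add, pairS_rev_zip _ _ hlen, hval, List.append_nil]
    have hpos : (0:Nat) < 2 ^ n := Nat.two_pow_pos _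
    by_cases hc : S / 2 ^ n = 0
    · rw [if_neg (by simp [hc])]
      have hlt : S < 2 ^ n := by
        have hdm := Nat.div_add_mod S (2 ^ n)
        have hm := Nat.mod_lt S hpos
        rw [hc] at hdm
        omega
      have hbl : (pvBits n (S % 2 ^ n)).length = n := pvBits_length _ _
      rw [show ((a'.length : Int)) = ((pvBits n (S % 2 ^ n)).length : Int) by rw [hlenA, hbl]]
      rw [slice_from_neg_len, Nat.mod_eq_of_lt hlt]
      unfold pvOut
      rw [if_pos hlt]
    · rw [if_pos (show (pvBits n (S % 2 ^ n), S / 2 ^ n).2 ≠ 0 from hc)]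
      have hge : 2 ^ n ≤ S := (Nat.div_pos_iff.mp (Nat.pos_of_ne_zero hc)).2
      have hn1 : 1 ≤ n := by
        by_contra h
        have hn0 : n = 0 := by omega
        have ha0 : a.toList = [] := List.length_eq_zero_iff.mp (by omega)
        have hb0 : b.toList = [] := List.length_eq_zero_iff.mp (by omega)
        rw [hSdef, ha0, hb0] at hge
        simp [pvValA, hn0] at hge
      have h2n : (2:Nat) ≤ 2 ^ n := by
        calc (2:Nat) = 2 ^ 1 := by norm_num
        _ ≤ 2 ^ n := Nat.pow_le_pow_right (by norm_num) hn1
      have hmlt : S % 2 ^ n < 2 ^ n := Nat.mod_lt _ hpos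
      have hrval : pvValA (String.ofList (pvBits n (S % 2 ^ n))).toList + pvValA "1".toList
          = S % 2 ^ n + 1 := by
        have h1 : pvValA "1".toList = 1 := by decide
        rw [h1]
        simp [pvValA_pvBits, Nat.mod_mod_of_dvd]
      have hS1lt : S % 2 ^ n + 1 < S := by
        have hq : 1 ≤ S / 2 ^ n := (Nat.one_le_div_iff hpos).mpr hge
        have hmul : 2 ^ n ≤ 2 ^ n * (S / 2 ^ n) := Nat.le_mul_of_pos_right _ hq
        have hdm := Nat.div_add_mod S (2 ^ n)
        omega
      have hinner := ih (String.ofList (pvBits n (S % 2 ^ n))) "1" (by omega)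
      rw [hrval] at hinner
      have hmaxr : max (String.ofList (pvBits n (S % 2 ^ n))).length ("1" : String).length = n := by
        have hl1 : (String.ofList (pvBits n (S % 2 ^ n))).length = n := by
          simp [pvBits_length]
        have hl2 : ("1" : String).length = 1 := by decide
        rw [hl1, hl2]
        omega
      rw [hmaxr] at hinner
      rw [hinner]
      have htl : (String.ofList (pvBits n (pvOut n (S % 2 ^ n + 1)))).toList
          = pvBits n (pvOut n (S % 2 ^ n + 1)) := by simp
      rw [htl]
      have hbl : (pvBits n (pvOut n (S % 2 ^ n + 1))).length = n := pvBits_length _ _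
      rw [show ((a'.length : Int)) = ((pvBits n (pvOut n (S % 2 ^ n + 1))).length : Int) by
        rw [hlenA, hbl]]
      rw [slice_from_neg_len]
      congr 2
      exact pvOut_wrap n S hn1 hge

lemma A_closed (a b : String) :
    add_binary_ones_complement a b =
      String.ofList (pvBits (max a.length b.length)
        (pvOut (max a.length b.length) (pvValA a.toList + pvValA b.toList))) := by
  rw [add_binary_ones_complement]
  exact A_go_closed _ a b (by omega)

lemma pvBinPadB_eq_pvBits : ∀ (k m : Nat), pvBinPadB k m = pvBits k m := by
  intro k
  induction k with
  | zero => intro m; rfl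
  | succ k ih => intro m; rw [pvBinPadB, pvBits, ih]

lemma B_closed (a b : String) :
    add_binary_ones_complement_alt a b =
      String.ofList (pvBits (max a.length b.length) (pvOut (max a.length b.length)
        (pvValA a.toList + pvValA b.toList))) := by
  have hfold : ∀ (l : List Char),
      l.foldl (fun acc c => acc * 2 + pvDigB c) 0 = pvValA l := fun l => rfl
  simp only [add_binary_ones_complement_alt, hfold, pvBinPadB_eq_pvBits]
  by_cases h0 : max a.length b.length = 0
  · rw [if_pos h0, h0]
    rfl
  · rw [if_neg h0]
    congr 1
    set S := pvValA a.toList + pvValA b.toList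
    unfold pvOut
    split_ifs <;> first | rfl | omega

-- ===== VERDICT (by name: the statement is the Claim_ definition above) =====
theorem add_binary_ones_complement_spec : Claim_equal_add_binary_ones_complement := by
  intro a b _ _
  unfold Spec_add_binary_ones_complement
  rw [A_closed, B_closed]
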